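-- pv_equiv track=rewrite | github.com/horv1tz/dyachenko-is22 | PZ6/2.py | count_increasing_segments
-- ===== SOURCE A (Python) =====
-- def count_increasing_segments(lst):
--     count = 0
--     i = 0
--     while i < len(lst) - 1:
--         if lst[i] < lst[i + 1]:
--             # Начало нового возрастающего участка
--             while i < len(lst) - 1 and lst[i] < lst[i + 1]:
--                 i += 1
--             count += 1
--         i += 1
--     return count
-- ===== SOURCE B (Python) =====
-- def count_increasing_segments(lst):
--     count = 0
--     prev_inc = False
--     for a, b in zip(lst, lst[1:]):
--         inc = a < b
--         if inc and not prev_inc: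
--             count += 1
--         prev_inc = inc
--     return count
-- ===== Notes on version B (the rewrite author's own statement) =====
-- stated objective: simpler
-- what changed: Replaces A's nested skip-ahead while-loops over indices with a single flat pass over adjacent pairs that counts rising edges via a prev_inc flag.
import Mathlib
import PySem

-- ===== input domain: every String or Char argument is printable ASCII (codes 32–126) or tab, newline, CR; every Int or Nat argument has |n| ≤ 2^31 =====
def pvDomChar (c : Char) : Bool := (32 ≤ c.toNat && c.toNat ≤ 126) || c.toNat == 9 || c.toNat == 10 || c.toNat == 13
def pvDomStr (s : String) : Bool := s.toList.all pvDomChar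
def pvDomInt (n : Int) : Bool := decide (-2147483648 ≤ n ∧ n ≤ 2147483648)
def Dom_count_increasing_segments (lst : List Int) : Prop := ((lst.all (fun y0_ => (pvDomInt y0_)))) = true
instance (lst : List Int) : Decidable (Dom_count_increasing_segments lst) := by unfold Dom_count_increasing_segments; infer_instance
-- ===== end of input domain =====

-- B replaces A's nested skip-ahead index loops with a single flat pass over adjacent pairs counting rising edges; same O(n) cost, simpler.


-- ===== PORT A =====
-- inner 'while i < len(lst)-1 and lst[i] < lst[i+1]: i += 1' (indices used are always in range, so getD is exact)
def csInner (lst : List Int) (i : Nat) : Nat :=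
  if i < lst.length - 1 ∧ lst.getD i 0 < lst.getD (i+1) 0 then
    csInner lst (i+1)
  else i
termination_by lst.length - i

theorem csInner_ge (lst : List Int) (i : Nat) : i ≤ csInner lst i := by
  fun_induction csInner lst i with
  | case1 i h ih => omega
  | case2 i h => omega

-- outer while loop of A
def csOuter (lst : List Int) (i : Nat) (count : Int) : Int :=
  if i < lst.length - 1 then
    if lst.getD i 0 < lst.getD (i+1) 0 then
      csOuter lst (csInner lst i + 1) (count + 1)
    else
      csOuter lst (i+1) count
  else count
termination_by lst.length - i
decreasing_by
  · have := csInner_ge lst i; omega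
  · omega

def count_increasing_segments (lst : List Int) : Int := csOuter lst 0 0

-- ===== PORT B =====
def csStep (st : Int × Bool) (p : Int × Int) : Int × Bool :=
  let inc := decide (p.1 < p.2)
  (if inc && !st.2 then st.1 + 1 else st.1, inc)

def count_increasing_segments_alt (lst : List Int) : Int :=
  ((lst.zip lst.tail).foldl csStep (0, false)).1

-- ===== PRECONDITION & SPEC =====
def Spec_count_increasing_segments (lst : List Int) (out : Int) : Prop := out = count_increasing_segments_alt lst
instance (lst : List Int) (out : Int) : Decidable (Spec_count_increasing_segments lst out) := by unfold Spec_count_increasing_segments; infer_instance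

-- ===== CLAIM (what is proved, stated in full; the proofs are below) =====
def Claim_equal_count_increasing_segments : Prop := ∀ (lst : List Int), Dom_count_increasing_segments lst → Spec_count_increasing_segments lst (count_increasing_segments lst)

-- ===== LEMMAS AND PROOFS =====

-- reference count: recursion over adjacent pairs with a previous-rise flag
def cnt : List Int → Bool → Int
  | a :: b :: rest, prev =>
      (if a < b ∧ prev = false then 1 else 0) + cnt (b :: rest) (decide (a < b))
  | _, _ => 0

theorem cnt_short (l : List Int) (prev : Bool) (h : l.length ≤ 1) : cnt l prev = 0 := by
  match l with
  | [] => rfl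
  | [a] => rfl
  | a :: b :: r => simp at h

theorem foldB (lst : List Int) : ∀ (c : Int) (prev : Bool),
    ((lst.zip lst.tail).foldl csStep (c, prev)).1 = c + cnt lst prev := by
  induction lst with
  | nil => intro c prev; simp [cnt]
  | cons a rest ih =>
    intro c prev
    match rest with
    | [] => simp [cnt]
    | b :: r =>
      simp only [List.tail_cons] at ih
      simp only [List.tail_cons, List.zip_cons_cons, List.foldl_cons, csStep]
      rw [ih]
      simp only [cnt]
      by_cases hab : a < b <;> cases prev <;> simp [hab] <;> try ring

theorem drop_one (lst : List Int) (i : Nat) (h : i < lst.length) :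
    lst.drop i = lst.getD i 0 :: lst.drop (i+1) := by
  rw [List.drop_eq_getElem_cons h, List.getD_eq_getElem lst 0 h]

theorem cnt_inner (lst : List Int) (i : Nat) :
    cnt (lst.drop i) true = cnt (lst.drop (csInner lst i + 1)) false := by
  fun_induction csInner lst i with
  | case1 i h ih =>
    rw [← ih, drop_one lst i (by omega), drop_one lst (i+1) (by omega)]
    simp only [cnt]
    rw [decide_eq_true h.2]
    simp
  | case2 i h =>
    by_cases hi : i < lst.length - 1
    · have hr : ¬ lst.getD i 0 < lst.getD (i+1) 0 := by tauto
      rw [drop_one lst i (by omega), drop_one lst (i+1) (by omega)]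
      simp only [cnt]
      rw [decide_eq_false hr]
      simp
    · rw [cnt_short _ _ (by simp [List.length_drop]; omega),
        cnt_short _ _ (by simp [List.length_drop]; omega)]

theorem outerA (lst : List Int) (i : Nat) (count : Int) :
    csOuter lst i count = count + cnt (lst.drop i) false := by
  fun_induction csOuter lst i count with
  | case1 i count h1 h2 ih =>
    rw [ih]
    have hinner : csInner lst i = csInner lst (i+1) := by
      rw [csInner, if_pos ⟨h1, h2⟩]
    have hskip := cnt_inner lst (i+1)
    rw [← hinner] at hskip
    rw [← hskip, drop_one lst i (by omega), drop_one lst (i+1) (by omega)]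
    simp only [cnt]
    rw [decide_eq_true h2, if_pos (show lst.getD i 0 < lst.getD (i+1) 0 ∧ True from ⟨h2, trivial⟩)]
    ring
  | case2 i count h1 h2 ih =>
    rw [ih, drop_one lst i (by omega), drop_one lst (i+1) (by omega)]
    simp only [cnt]
    rw [decide_eq_false h2, if_neg (fun hc => h2 hc.1)]
    ring
  | case3 i count h =>
    rw [cnt_short _ _ (by simp [List.length_drop]; omega)]
    ring

-- ===== VERDICT (by name: the statement is the Claim_ definition above) =====
theorem count_increasing_segments_spec : Claim_equal_count_increasing_segments := by
  intro lst _
  unfold Spec_count_increasing_segments count_increasing_segments count_increasing_segments_alt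
  rw [outerA, foldB]
  simp
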